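-- pv_equiv track=rewrite | github.com/eternalclash/CODING_TEST | 장주성/20230516/주식가격.py | solution
-- ===== SOURCE A (Python) =====
-- def solution(prices):
--     answer = []
--     arr = []
--     for i, v in enumerate(prices[:-1]):
--         arr.append(prices[i+1]-prices[i])
--
--     length = len(prices) - 1
--     for i, v in enumerate(prices):
--         answer.append(length - i)
--
--     result = []
--
--     for i, v in enumerate(arr):
--         result.append(sum(arr[i:]))
--
--     for i, v in enumerate(result):
--         if v <= 0:
--             answer[i] -= (v+1)
--
--     return answer
-- ===== SOURCE B (Python) =====
-- def solution(prices):
--     # O(n): each suffix sum of consecutive differences telescopes to last - prices[i]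
--     n = len(prices)
--     if n == 0:
--         return []
--     last = prices[-1]
--     out = []
--     for i in range(n - 1):
--         d = last - prices[i]
--         base = n - 1 - i
--         out.append(base - (d + 1) if d <= 0 else base)
--     out.append(0)
--     return out
-- ===== Notes on version B (the rewrite author's own statement) =====
-- stated objective: faster
-- what changed: Replaced the per-index sum of the suffix slice of the difference array (and the list-mutation pass) by the telescoped closed form last-price minus prices[i], building the answer in a single pass.
import Mathlib
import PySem

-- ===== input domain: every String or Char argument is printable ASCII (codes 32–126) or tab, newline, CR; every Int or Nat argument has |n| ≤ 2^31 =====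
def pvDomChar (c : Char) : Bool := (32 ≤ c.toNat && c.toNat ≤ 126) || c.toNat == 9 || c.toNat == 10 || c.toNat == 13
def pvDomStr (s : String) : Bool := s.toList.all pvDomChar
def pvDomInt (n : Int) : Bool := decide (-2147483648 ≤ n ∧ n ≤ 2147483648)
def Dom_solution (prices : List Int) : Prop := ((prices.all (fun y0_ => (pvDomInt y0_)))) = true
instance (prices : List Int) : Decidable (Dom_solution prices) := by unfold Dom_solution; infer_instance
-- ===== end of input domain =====

-- B replaces A's per-index suffix-slice summation by the telescoped closed form (last price minus prices[i]) in one pass.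


-- ===== PORT A =====
-- Literal transliteration; the indices prices[i+1], prices[i], answer[i] are always in range
-- in A's loops, so the total pyGetD/pySetD forms are exact there.
def solution (prices : List Int) : List Int :=
  let arr := (PySem.List.enumerate (PySem.List.slice prices none (some (-1)))).foldl
    (fun acc iv => acc ++ [PySem.List.pyGetD prices (iv.1 + 1) 0 - PySem.List.pyGetD prices iv.1 0]) []
  let length : Int := (prices.length : Int) - 1
  let answer := (PySem.List.enumerate prices).foldl
    (fun acc iv => acc ++ [length - iv.1]) []
  let result := (PySem.List.enumerate arr).foldl
    (fun acc iv => acc ++ [(PySem.List.slice arr (some iv.1) none).sum]) []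
  (PySem.List.enumerate result).foldl
    (fun acc iv => if iv.2 ≤ 0 then PySem.List.pySetD acc iv.1 (PySem.List.pyGetD acc iv.1 0 - (iv.2 + 1)) else acc)
    answer

-- ===== PORT B =====
def solution_alt (prices : List Int) : List Int :=
  let n : Int := prices.length
  if n = 0 then [] else
    let last := PySem.List.pyGetD prices (-1) 0
    let out := (PySem.List.pyRange 0 (n - 1) 1).foldl
      (fun acc i =>
        let d := last - PySem.List.pyGetD prices i 0
        let base := n - 1 - i
        acc ++ [if d ≤ 0 then base - (d + 1) else base]) []
    out ++ [0]

-- ===== PRECONDITION & SPEC =====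
def Spec_solution (prices : List Int) (out : List Int) : Prop := out = solution_alt prices
instance (prices : List Int) (out : List Int) : Decidable (Spec_solution prices out) := by unfold Spec_solution; infer_instance

-- ===== CLAIM (what is proved, stated in full; the proofs are below) =====
def Claim_equal_solution : Prop := ∀ (prices : List Int), Dom_solution prices → Spec_solution prices (solution prices)

-- ===== LEMMAS AND PROOFS =====

-- the result of A's final mutation loop: answer entries zipped with result entries
def pvMix : List Int → List Int → List Int
  | [], suf => suf
  | _ :: _, [] => []
  | v :: vs, a :: as => (if v ≤ 0 then a - (v + 1) else a) :: pvMix vs as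

theorem pvSet_append (pre : List Int) (a w : Int) (as : List Int) :
    (pre ++ a :: as).set pre.length w = pre ++ w :: as := by
  induction pre with
  | nil => rfl
  | cons x xs ih => simp [ih]

theorem pvGetD_append (pre : List Int) (a : Int) (as : List Int) :
    (pre ++ a :: as).getD pre.length 0 = a := by
  simp [List.getD_eq_getElem?_getD]

-- out-of-range writes leave the accumulator unchanged
theorem pvLoop_oob (res : List Int) : ∀ (s : Int) (acc : List Int), (acc.length : Int) ≤ s →
    (PySem.List.enumerate res s).foldl (fun acc iv => if iv.2 ≤ 0 then
        PySem.List.pySetD acc iv.1 (PySem.List.pyGetD acc iv.1 0 - (iv.2 + 1)) else acc) acc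
      = acc := by
  induction res with
  | nil => intro s acc _; rfl
  | cons v vs ih =>
    intro s acc h
    rw [PySem.List.enumerate_cons, List.foldl_cons]
    have hset : ∀ w : Int, PySem.List.pySetD acc s w = acc := by
      intro w
      unfold PySem.List.pySetD
      have : PySem.List.pySet? acc s w = none := by
        rw [PySem.List.pySet?_eq_none_iff]
        unfold PySem.Raise.InRange
        omega
      simp [this]
    have : (if v ≤ 0 then PySem.List.pySetD acc s (PySem.List.pyGetD acc s 0 - (v + 1)) else acc) = acc := by
      split <;> simp [hset]
    rw [this]
    exact ih (s + 1) acc (by omega)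

theorem pvMix_loop (res : List Int) : ∀ (pre suf : List Int),
    (PySem.List.enumerate res (pre.length : Int)).foldl
      (fun acc iv => if iv.2 ≤ 0 then
        PySem.List.pySetD acc iv.1 (PySem.List.pyGetD acc iv.1 0 - (iv.2 + 1)) else acc)
      (pre ++ suf) = pre ++ pvMix res suf := by
  induction res with
  | nil => intro pre suf; rfl
  | cons v vs ih =>
    intro pre suf
    rw [PySem.List.enumerate_cons, List.foldl_cons]
    cases suf with
    | nil =>
      have hstep : (if v ≤ 0 then
          PySem.List.pySetD (pre ++ []) (pre.length : Int)
            (PySem.List.pyGetD (pre ++ []) (pre.length : Int) 0 - (v + 1)) else pre ++ []) = pre := by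
        have h1 : ∀ w : Int, PySem.List.pySetD (pre ++ []) (pre.length : Int) w = pre ++ [] := by
          intro w
          rw [PySem.List.pySetD_natCast, List.set_eq_of_length_le (by simp)]
        split
        · rw [h1]; simp
        · simp
      rw [hstep]
      rw [pvLoop_oob vs ((pre.length : Int) + 1) pre (by omega)]
      simp [pvMix]
    | cons a as =>
      have hget : PySem.List.pyGetD (pre ++ a :: as) (pre.length : Int) 0 = a := by
        rw [PySem.List.pyGetD_natCast]; exact pvGetD_append pre a as
      have hset : ∀ w : Int, PySem.List.pySetD (pre ++ a :: as) (pre.length : Int) w = pre ++ w :: as := by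
        intro w; rw [PySem.List.pySetD_natCast]; exact pvSet_append pre a w as
      have hstep : (if v ≤ 0 then
          PySem.List.pySetD (pre ++ a :: as) (pre.length : Int)
            (PySem.List.pyGetD (pre ++ a :: as) (pre.length : Int) 0 - (v + 1)) else pre ++ a :: as)
          = pre ++ (if v ≤ 0 then a - (v + 1) else a) :: as := by
        rw [hget]; split <;> simp [hset]
      rw [hstep]
      have hlen : (pre.length : Int) + 1 = (((pre ++ [if v ≤ 0 then a - (v + 1) else a]).length : Nat) : Int) := by
        simp
      rw [hlen]
      have hre : pre ++ (if v ≤ 0 then a - (v + 1) else a) :: as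
          = (pre ++ [if v ≤ 0 then a - (v + 1) else a]) ++ as := by simp
      rw [hre, ih (pre ++ [if v ≤ 0 then a - (v + 1) else a]) as]
      simp [pvMix]

theorem pvMix_map (f g : Nat → Int) (x : Int) (l : List Nat) :
    pvMix (l.map f) (l.map g ++ [x])
      = l.map (fun k => if f k ≤ 0 then g k - (f k + 1) else g k) ++ [x] := by
  induction l with
  | nil => rfl
  | cons k l ih => simp [pvMix, ih]

theorem pvTelescope (P : Nat → Int) (j : Nat) : ∀ k,
    ((List.range' k j).map (fun i => P (i + 1) - P i)).sum = P (k + j) - P k := by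
  induction j with
  | zero => simp
  | succ j ih => intro k; rw [List.range'_succ]; simp [ih (k + 1)]; ring_nf

theorem pvMain (prices : List Int) (hne : prices ≠ []) : solution prices = solution_alt prices := by
  obtain ⟨m, hm⟩ : ∃ m, prices.length = m + 1 := by
    cases prices with
    | nil => exact absurd rfl hne
    | cons p ps => exact ⟨ps.length, rfl⟩
  -- A's first loop builds the difference array
  have harr : (PySem.List.enumerate (PySem.List.slice prices none (some (-1)))).foldl
      (fun acc iv => acc ++ [PySem.List.pyGetD prices (iv.1 + 1) 0 - PySem.List.pyGetD prices iv.1 0]) []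
      = (List.range m).map (fun k : Nat => prices.getD (k + 1) 0 - prices.getD k 0) := by
    rw [PySem.List.foldl_append_singleton_eq_map, PySem.List.slice_to_neg_one, List.nil_append]
    apply List.ext_getElem
    · simp [PySem.List.length_enumerate]; omega
    · intro k h1 h2
      simp only [List.getElem_map, PySem.List.getElem_enumerate, List.getElem_range]
      rw [show ((0 : Int) + (k : Int) + 1) = ((k + 1 : Nat) : Int) by push_cast; ring,
          PySem.List.pyGetD_natCast]
      rw [show ((0 : Int) + (k : Int)) = ((k : Nat) : Int) by ring,
          PySem.List.pyGetD_natCast]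
  -- A's second loop: the initial answer, with its last entry 0 split off
  have hans : (PySem.List.enumerate prices).foldl
      (fun acc iv => acc ++ [((prices.length : Int)) - 1 - iv.1]) []
      = (List.range m).map (fun k : Nat => ((prices.length : Int)) - 1 - (k : Int)) ++ [0] := by
    rw [PySem.List.foldl_append_singleton_eq_map, List.nil_append]
    have hr : List.range prices.length = List.range m ++ [m] := by
      rw [hm, List.range_succ]
    apply List.ext_getElem
    · simp [PySem.List.length_enumerate]; omega
    · intro k h1 h2
      have hk : k < m + 1 := by
        simpa [PySem.List.length_enumerate, hm] using h1
      simp only [List.getElem_map, PySem.List.getElem_enumerate]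
      by_cases hkm : k < m
      · rw [List.getElem_append_left (by simpa using hkm)]
        simp
      · have hkm' : k = m := by omega
        subst hkm'
        rw [List.getElem_append_right (by simp)]
        simp [hm]
  -- A's third loop: each suffix sum telescopes to prices[m] - prices[k]
  have hres : (PySem.List.enumerate ((List.range m).map (fun k : Nat => prices.getD (k + 1) 0 - prices.getD k 0))).foldl
      (fun acc iv => acc ++ [(PySem.List.slice ((List.range m).map (fun k : Nat => prices.getD (k + 1) 0 - prices.getD k 0)) (some iv.1) none).sum]) []
      = (List.range m).map (fun k : Nat => prices.getD m 0 - prices.getD k 0) := by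
    rw [PySem.List.foldl_append_singleton_eq_map, List.nil_append]
    apply List.ext_getElem
    · simp [PySem.List.length_enumerate]
    · intro k h1 h2
      have hk : k < m := by simpa using h2
      simp only [List.getElem_map, PySem.List.getElem_enumerate, List.getElem_range]
      rw [show ((0 : Int) + (k : Int)) = ((k : Nat) : Int) by ring,
          PySem.List.slice_from_natCast]
      rw [← List.map_drop, List.range_eq_range', List.drop_range']
      simp only [Nat.zero_add, Nat.mul_one]
      rw [pvTelescope (fun k => prices.getD k 0) (m - k) k]
      congr 2
      omega
  -- the final mutation loop is pvMix
  have hmix : ∀ (res ans : List Int),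
      (PySem.List.enumerate res).foldl
        (fun acc iv => if iv.2 ≤ 0 then
          PySem.List.pySetD acc iv.1 (PySem.List.pyGetD acc iv.1 0 - (iv.2 + 1)) else acc) ans
        = pvMix res ans := by
    intro res ans
    simpa using pvMix_loop res [] ans
  -- assemble side A
  have hA : solution prices
      = (List.range m).map
          (fun k : Nat => if prices.getD m 0 - prices.getD k 0 ≤ 0
            then (((prices.length : Int)) - 1 - (k : Int)) - ((prices.getD m 0 - prices.getD k 0) + 1)
            else ((prices.length : Int)) - 1 - (k : Int)) ++ [0] := by
    show (PySem.List.enumerate _).foldl _ _ = _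
    rw [harr, hans, hres, hmix, pvMix_map]
  -- assemble side B
  have hlast : PySem.List.pyGetD prices (-1) 0 = prices.getD m 0 := by
    rw [PySem.List.pyGetD_neg_one prices 0 hne, List.getLast_eq_getElem]
    rw [List.getD_eq_getElem?_getD, List.getElem?_eq_getElem (by omega)]
    simp [hm]
  have hB : solution_alt prices
      = (List.range m).map
          (fun k : Nat => if prices.getD m 0 - prices.getD k 0 ≤ 0
            then (((prices.length : Int)) - 1 - (k : Int)) - ((prices.getD m 0 - prices.getD k 0) + 1)
            else ((prices.length : Int)) - 1 - (k : Int)) ++ [0] := by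
    show (if ((prices.length : Int)) = 0 then _ else _) = _
    rw [if_neg (by omega)]
    rw [PySem.List.foldl_append_singleton_eq_map, List.nil_append]
    rw [show ((prices.length : Int) - 1) = ((m : Nat) : Int) by omega]
    rw [PySem.List.pyRange_zero_natCast, List.map_map]
    congr 1
    apply List.map_congr_left
    intro k _
    simp only [Function.comp_apply]
    rw [hlast, PySem.List.pyGetD_natCast]
  rw [hA, hB]

-- ===== VERDICT (by name: the statement is the Claim_ definition above) =====
theorem solution_spec : Claim_equal_solution := by
  intro prices _
  unfold Spec_solution
  cases prices with
  | nil => rfl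
  | cons p ps => exact pvMain (p :: ps) (by simp)
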